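-- pv_equiv track=rewrite | github.com/ImJiyun/Algorithm | 프로그래머스/0/181921. 배열 만들기 2/배열 만들기 2.py | solution
-- ===== SOURCE A (Python) =====
-- def solution(l, r):
--     answer = []
--     nums = ["5", "0"]
--
--     def dfs(n):
--         val = int(n)
--         if val > r:
--             return
--         if val >= l:
--             answer.append(val)
--
--         for nxt in nums:
--             dfs(n + nxt)
--
--     dfs("5")
--
--     return sorted(answer) if answer else [-1]
-- ===== SOURCE B (Python) =====
-- def solution(l, r):
--     # Iterative breadth-first generation by digit length instead of recursive DFS:
--     # level i holds every candidate ("5" followed by i digits from {0,5}) as an int,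
--     # in increasing order, so the collected answer is already sorted.
--     answer = []
--     level = [5]
--     low = 5  # smallest member of the current level: 5 * 10**i
--     while low <= r:
--         answer += [v for v in level if l <= v <= r]
--         level = [10 * v + d for v in level for d in (0, 5)]
--         low *= 10
--     return answer if answer else [-1]
-- ===== Notes on version B (the rewrite author's own statement) =====
-- stated objective: alternative
-- what changed: Replaced the recursive depth-first walk that builds each candidate as a string and re-parses it with int() by an iterative breadth-first loop over digit lengths that keeps each level as a list of ints, collects the in-range ones per level, and never needs the final sort because levels are emitted in increasing order.
import Mathlib
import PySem

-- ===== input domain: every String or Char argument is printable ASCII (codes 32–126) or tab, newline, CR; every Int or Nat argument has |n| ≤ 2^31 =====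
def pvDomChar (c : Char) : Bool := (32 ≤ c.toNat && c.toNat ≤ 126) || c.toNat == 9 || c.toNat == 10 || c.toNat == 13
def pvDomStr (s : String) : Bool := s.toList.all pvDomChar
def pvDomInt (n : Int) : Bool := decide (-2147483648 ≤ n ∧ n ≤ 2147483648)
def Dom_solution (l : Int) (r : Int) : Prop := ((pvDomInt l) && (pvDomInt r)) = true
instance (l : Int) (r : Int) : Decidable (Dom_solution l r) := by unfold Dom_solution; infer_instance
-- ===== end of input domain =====

-- B replaces A's recursive string-building DFS by an iterative per-digit-length (breadth-first)
-- generation over ints that emits the answer already in increasing order (objective: alternative).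

-- ===== PORT A =====
-- int(n) hand-ported for the strings this dfs builds: n is always a nonempty string of
-- ASCII digits (no sign, no whitespace, no underscore), where Python's int() is exactly
-- this base-10 fold over the characters.
def pyIntDigits (s : String) : Int :=
  s.toList.foldl (fun a c => 10 * a + ((c.toNat : Int) - 48)) 0

-- dfs(n): the fuel argument only makes the recursion structural; with the fuel passed by
-- `solution` below it is never exhausted (the `val > r` test stops the recursion first).
-- `for nxt in nums` with nums = ["5", "0"] is unrolled into its two iterations.
def dfsA (l r : Int) : Nat → String → List Int → List Int
  | 0, _, answer => answer
  | fuel + 1, n, answer =>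
      let val := pyIntDigits n
      if val > r then answer
      else
        let answer := if val ≥ l then answer ++ [val] else answer
        let answer := dfsA l r fuel (n ++ "5") answer
        dfsA l r fuel (n ++ "0") answer

def solution (l : Int) (r : Int) : List Int :=
  let answer := dfsA l r (r.toNat + 1) "5" []
  if answer = [] then [-1] else PySem.List.sorted answer (fun x => x)

-- ===== PORT B =====
-- while low <= r: collect the in-range members of the current level, expand the level by
-- one digit, low *= 10.  Fuel only makes the loop structural; with the fuel passed by
-- `solution_alt` it is never exhausted (low exceeds r first).
def goB (l r : Int) : Nat → Int → List Int → List Int → List Int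
  | 0, _, _, answer => answer
  | fuel + 1, low, level, answer =>
      if low ≤ r then
        goB l r fuel (low * 10)
          (level.flatMap (fun v => [(0 : Int), 5].map (fun d => 10 * v + d)))
          (answer ++ level.filter (fun v => decide (l ≤ v) && decide (v ≤ r)))
      else answer

def solution_alt (l : Int) (r : Int) : List Int :=
  let answer := goB l r (r.toNat + 1) 5 [5] []
  if answer = [] then [-1] else answer

-- ===== PRECONDITION & SPEC =====
def Spec_solution (l : Int) (r : Int) (out : List Int) : Prop := out = solution_alt l r
instance (l : Int) (r : Int) (out : List Int) : Decidable (Spec_solution l r out) := by unfold Spec_solution; infer_instance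

-- ===== CLAIM (what is proved, stated in full; the proofs are below) =====
def Claim_equal_solution : Prop := ∀ (l : Int) (r : Int), Dom_solution l r → Spec_solution l r (solution l r)

-- ===== LEMMAS AND PROOFS =====

-- level i of the candidate tree grown from root v (the ints with i extra digits from {0,5})
def lv : Nat → Int → List Int
  | 0, v => [v]
  | i + 1, v => (lv i v).flatMap (fun v => [(0 : Int), 5].map (fun d => 10 * v + d))

-- what A's dfs below a node of value v appends to the accumulator, with fuel f
def tree (l r : Int) : Nat → Int → List Int
  | 0, _ => []
  | f + 1, v =>
      if v > r then []
      else (if v ≥ l then [v] else []) ++ tree l r f (10 * v + 5) ++ tree l r f (10 * v)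

theorem lv_root (i : Nat) (v : Int) :
    lv (i + 1) v = lv i (10 * v) ++ lv i (10 * v + 5) := by
  induction i generalizing v with
  | zero => simp [lv]
  | succ i ih =>
      show ((lv (i + 1) v).flatMap _) = _
      rw [ih, List.flatMap_append]
      rfl

theorem lv_bounds (i : Nat) (v : Int) (hv : 0 ≤ v) :
    ∀ u ∈ lv i v, v * 10 ^ i ≤ u ∧ u < (v + 1) * 10 ^ i := by
  induction i generalizing v with
  | zero => simp [lv]
  | succ i ih =>
      intro u hu
      rw [lv_root] at hu
      have h10 : (0:Int) < 10 ^ i := by positivity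
      rcases List.mem_append.1 hu with h | h
      · have := ih (10 * v) (by positivity) u h
        constructor
        · calc v * 10 ^ (i + 1) = 10 * v * 10 ^ i := by ring
            _ ≤ u := this.1
        · calc u < (10 * v + 1) * 10 ^ i := this.2
            _ ≤ (v + 1) * 10 ^ (i + 1) := by rw [pow_succ]; nlinarith
      · have := ih (10 * v + 5) (by positivity) u h
        constructor
        · calc v * 10 ^ (i + 1) ≤ (10 * v + 5) * 10 ^ i := by rw [pow_succ]; nlinarith
            _ ≤ u := this.1
        · calc u < (10 * v + 5 + 1) * 10 ^ i := this.2
            _ ≤ (v + 1) * 10 ^ (i + 1) := by rw [pow_succ]; nlinarith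

theorem lv_pairwise (i : Nat) (v : Int) (hv : 0 ≤ v) :
    (lv i v).Pairwise (· < ·) := by
  induction i generalizing v with
  | zero => simp [lv]
  | succ i ih =>
      rw [lv_root, List.pairwise_append]
      refine ⟨ih (10 * v) (by positivity), ih (10 * v + 5) (by positivity), ?_⟩
      intro a ha b hb
      have h10 : (0:Int) < 10 ^ i := by positivity
      have h1 := (lv_bounds i (10 * v) (by positivity) a ha).2
      have h2 := (lv_bounds i (10 * v + 5) (by positivity) b hb).1
      nlinarith

theorem flatMap_append_perm (xs : List Nat) (A B : Nat → List Int) :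
    (xs.flatMap (fun i => A i ++ B i)).Perm (xs.flatMap A ++ xs.flatMap B) := by
  induction xs with
  | nil => simp
  | cons x xs ih =>
      simp only [List.flatMap_cons]
      rw [List.append_assoc, List.append_assoc]
      exact ((ih.append_left (B x)).trans (List.perm_append_comm_assoc _ _ _)).append_left (A x)

theorem filter_lv_eq_nil (i : Nat) (l r w : Int) (hw : 0 ≤ w) (hr : r < w) :
    (lv i w).filter (fun v => decide (l ≤ v) && decide (v ≤ r)) = [] := by
  rw [List.filter_eq_nil_iff]
  intro u hu
  have h1 := (lv_bounds i w hw u hu).1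
  have h10 : (1:Int) ≤ 10 ^ i := one_le_pow₀ (by norm_num)
  have hwu : w ≤ u := le_trans (by nlinarith) h1
  simp only [Bool.and_eq_true, decide_eq_true_eq, not_and]
  intro _
  omega

theorem filter_lv5_eq_nil (k : Nat) (l r : Int) (hr : r < 5 * 10 ^ k) :
    (lv k 5).filter (fun v => decide (l ≤ v) && decide (v ≤ r)) = [] := by
  rw [List.filter_eq_nil_iff]
  intro u hu
  have h1 := (lv_bounds k 5 (by norm_num) u hu).1
  simp only [Bool.and_eq_true, decide_eq_true_eq, not_and]
  intro _
  omega

theorem tree_perm (l r : Int) (f : Nat) (v : Int) (hv : 5 ≤ v) :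
    (tree l r f v).Perm
      ((List.range f).flatMap
        (fun i => (lv i v).filter (fun u => decide (l ≤ u) && decide (u ≤ r)))) := by
  induction f generalizing v with
  | zero => simp [tree]
  | succ f ih =>
      rw [List.range_succ_eq_map, List.flatMap_cons, List.flatMap_map]
      simp only [lv_root, List.filter_append]
      by_cases hvr : v > r
      · have hnil : ((List.range f).flatMap (fun i =>
            (lv i (10 * v)).filter (fun u => decide (l ≤ u) && decide (u ≤ r)) ++
            (lv i (10 * v + 5)).filter (fun u => decide (l ≤ u) && decide (u ≤ r)))) = [] := by
          rw [List.flatMap_eq_nil_iff]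
          intro i _
          rw [filter_lv_eq_nil i l r (10 * v) (by linarith) (by linarith),
              filter_lv_eq_nil i l r (10 * v + 5) (by linarith) (by linarith)]
          rfl
        have hfil : (lv 0 v).filter (fun u => decide (l ≤ u) && decide (u ≤ r)) = [] := by
          simp [lv]
          omega
        rw [hnil, hfil]
        simp [tree, hvr]
      · rw [not_lt] at hvr
        have hopt : (lv 0 v).filter (fun u => decide (l ≤ u) && decide (u ≤ r)) =
            (if v ≥ l then [v] else []) := by
          simp only [lv, List.filter_singleton]
          by_cases hl : l ≤ v
          · simp [hl, hvr, ge_iff_le]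
          · simp [hl, ge_iff_le]
        rw [hopt]
        have h5 := ih (10 * v + 5) (by linarith)
        have h0 := ih (10 * v) (by linarith)
        have hsw : ((tree l r f (10 * v + 5)) ++ (tree l r f (10 * v))).Perm
            ((List.range f).flatMap (fun i =>
              (lv i (10 * v)).filter (fun u => decide (l ≤ u) && decide (u ≤ r)) ++
              (lv i (10 * v + 5)).filter (fun u => decide (l ≤ u) && decide (u ≤ r)))) := by
          refine ((h5.append h0).trans List.perm_append_comm).trans ?_
          exact (flatMap_append_perm _ _ _).symm
        have := hsw.append_left (if v ≥ l then [v] else [])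
        simpa [tree, hvr, List.append_assoc, show ¬ (v > r) from not_lt.2 hvr] using this

theorem goB_spec (l r : Int) (f : Nat) :
    ∀ (i : Nat) (answer : List Int),
      goB l r f (5 * 10 ^ i) (lv i 5) answer =
        answer ++ (List.range f).flatMap
          (fun j => (lv (i + j) 5).filter (fun u => decide (l ≤ u) && decide (u ≤ r))) := by
  induction f with
  | zero => intro i answer; simp [goB]
  | succ f ih =>
      intro i answer
      rw [goB]
      by_cases hlow : 5 * 10 ^ i ≤ r
      · rw [if_pos hlow]
        have hl : (5 : Int) * 10 ^ i * 10 = 5 * 10 ^ (i + 1) := by ring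
        have hlevel : (lv i 5).flatMap (fun v => [(0 : Int), 5].map (fun d => 10 * v + d)) =
            lv (i + 1) 5 := rfl
        rw [hl, hlevel, ih (i + 1)]
        rw [List.range_succ_eq_map, List.flatMap_cons, List.flatMap_map]
        simp only [Nat.add_zero, List.append_assoc,
          Nat.succ_eq_add_one, show ∀ j : Nat, i + 1 + j = i + (j + 1) from fun j => by omega]
      · rw [if_neg hlow]
        have hnil : ((List.range (f + 1)).flatMap
            (fun j => (lv (i + j) 5).filter (fun u => decide (l ≤ u) && decide (u ≤ r)))) = [] := by
          rw [List.flatMap_eq_nil_iff]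
          intro j _
          refine filter_lv5_eq_nil (i + j) l r ?_
          have hmono : (10:Int) ^ i ≤ 10 ^ (i + j) :=
            pow_le_pow_right₀ (by norm_num) (by omega)
          rw [not_le] at hlow
          calc r < 5 * 10 ^ i := hlow
            _ ≤ 5 * 10 ^ (i + j) := by linarith
        rw [hnil, List.append_nil]

theorem pyIntDigits_append5 (n : String) :
    pyIntDigits (n ++ "5") = 10 * pyIntDigits n + 5 := by
  simp [pyIntDigits, String.toList_append, List.foldl_append]

theorem pyIntDigits_append0 (n : String) :
    pyIntDigits (n ++ "0") = 10 * pyIntDigits n := by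
  simp [pyIntDigits, String.toList_append, List.foldl_append]

theorem dfsA_tree (l r : Int) (f : Nat) :
    ∀ (n : String) (answer : List Int),
      dfsA l r f n answer = answer ++ tree l r f (pyIntDigits n) := by
  induction f with
  | zero => intro n answer; simp [dfsA, tree]
  | succ f ih =>
      intro n answer
      simp only [dfsA]
      by_cases h1 : pyIntDigits n > r
      · simp [tree, h1]
      · rw [if_neg h1]
        rw [ih (n ++ "5"), ih (n ++ "0")]
        rw [pyIntDigits_append5, pyIntDigits_append0]
        by_cases h2 : pyIntDigits n ≥ l
        · simp [tree, h1, h2, List.append_assoc]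
        · simp [tree, h1, h2, List.append_assoc]

theorem bfs_pairwise (l r : Int) (f : Nat) :
    ((List.range f).flatMap
      (fun j => (lv j 5).filter (fun u => decide (l ≤ u) && decide (u ≤ r)))).Pairwise (· < ·) := by
  induction f with
  | zero => simp
  | succ f ih =>
      rw [List.range_succ, List.flatMap_append, List.pairwise_append]
      refine ⟨ih, ?_, ?_⟩
      · simp only [List.flatMap_cons, List.flatMap_nil, List.append_nil]
        exact (lv_pairwise f 5 (by norm_num)).filter _
      · intro a ha b hb
        simp only [List.flatMap_cons, List.flatMap_nil, List.append_nil, List.mem_filter] at hb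
        simp only [List.mem_flatMap, List.mem_range, List.mem_filter] at ha
        obtain ⟨j, hj, haj, -⟩ := ha
        have hb1 := (lv_bounds f 5 (by norm_num) b hb.1).1
        have ha1 := (lv_bounds j 5 (by norm_num) a haj).2
        have hmono : (10:Int) ^ (j + 1) ≤ 10 ^ f :=
          pow_le_pow_right₀ (by norm_num) (by omega)
        have h10 : (0:Int) < 10 ^ j := by positivity
        have : a < 10 ^ (j + 1) := by
          calc a < (5 + 1) * 10 ^ j := ha1
            _ ≤ 10 ^ (j + 1) := by rw [pow_succ]; nlinarith
        have h10f : (0:Int) < 10 ^ f := by positivity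
        calc a < 10 ^ (j + 1) := this
          _ ≤ 10 ^ f := hmono
          _ ≤ 5 * 10 ^ f := by linarith
          _ ≤ b := hb1

-- ===== VERDICT (by name: the statement is the Claim_ definition above) =====
theorem solution_spec : Claim_equal_solution := by
  intro l r _hdom
  unfold Spec_solution solution solution_alt
  have h5 : pyIntDigits "5" = 5 := by decide
  have hA : dfsA l r (r.toNat + 1) "5" [] = tree l r (r.toNat + 1) 5 := by
    rw [dfsA_tree, h5]; rfl
  have hB : goB l r (r.toNat + 1) 5 [5] [] =
      (List.range (r.toNat + 1)).flatMap
        (fun j => (lv j 5).filter (fun u => decide (l ≤ u) && decide (u ≤ r))) := by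
    have := goB_spec l r (r.toNat + 1) 0 []
    simpa [lv] using this
  have hperm := tree_perm l r (r.toNat + 1) 5 (by norm_num)
  have hsorted : PySem.List.sorted (tree l r (r.toNat + 1) 5) (fun x => x) =
      (List.range (r.toNat + 1)).flatMap
        (fun j => (lv j 5).filter (fun u => decide (l ≤ u) && decide (u ≤ r))) :=
    PySem.List.sorted_eq_of_perm_of_pairwise_lt _ _ _ hperm.symm (bfs_pairwise l r _)
  rw [hA, hB]
  by_cases hnil : tree l r (r.toNat + 1) 5 = []
  · have : ((List.range (r.toNat + 1)).flatMap
        (fun j => (lv j 5).filter (fun u => decide (l ≤ u) && decide (u ≤ r)))) = [] := by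
      rw [hnil] at hperm
      exact hperm.symm.eq_nil
    rw [hnil, this]
    simp
  · have hne : ((List.range (r.toNat + 1)).flatMap
        (fun j => (lv j 5).filter (fun u => decide (l ≤ u) && decide (u ≤ r)))) ≠ [] := by
      intro h
      exact hnil (by rw [h] at hperm; exact hperm.eq_nil)
    rw [if_neg hnil, if_neg hne]
    exact hsorted
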